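-- pv_equiv track=rewrite | github.com/xuhongming0909-sys/Alpha-monitor | tools/fetch_historical_premium.py | _pick_market_samples
-- ===== SOURCE A (Python) =====
-- from typing import Any, Dict, List, Optional
--
-- def _pick_market_samples(pair_data: Dict[str, List[Dict[str, Any]]]) -> Dict[str, str]:
--     samples: Dict[str, str] = {
--         "sh": "",
--         "sz": "",
--         "hk": "",
--         "us": "",
--         "shb": "",
--         "szb": "",
--     }
--
--     for item in pair_data.get("ah", []):
--         a_code = str(item.get("aCode") or "").strip()
--         h_code = str(item.get("hCode") or "").strip()
--         if a_code.startswith("6") and not samples["sh"]: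
--             samples["sh"] = a_code
--         if a_code and not a_code.startswith("6") and not samples["sz"]:
--             samples["sz"] = a_code
--         if h_code and not samples["hk"]:
--             samples["hk"] = h_code
--
--     for item in pair_data.get("ab", []):
--         a_code = str(item.get("aCode") or "").strip()
--         b_code = str(item.get("bCode") or "").strip()
--         b_market = str(item.get("bMarket") or "").strip().lower()
--         if a_code.startswith("6") and not samples["sh"]:
--             samples["sh"] = a_code
--         if a_code and not a_code.startswith("6") and not samples["sz"]:
--             samples["sz"] = a_code
--         if b_market == "sh" and b_code and not samples["shb"]:
--             samples["shb"] = b_code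
--         if b_market == "sz" and b_code and not samples["szb"]:
--             samples["szb"] = b_code
--
--     fallbacks = {
--         "sh": "600000",
--         "sz": "000001",
--         "hk": "00005",
--         "shb": "900901",
--         "szb": "200002",
--     }
--     for market, fallback in fallbacks.items():
--         if not samples[market]:
--             samples[market] = fallback
--
--     return samples
-- ===== SOURCE B (Python) =====
-- from itertools import chain
-- from typing import Any, Dict, List
--
--
-- def _pick_market_samples(pair_data: Dict[str, List[Dict[str, Any]]]) -> Dict[str, str]:
--     def norm(item, key):
--         return str(item.get(key) or "").strip()
--
--     ah = pair_data.get("ah", [])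
--     ab = pair_data.get("ab", [])
--
--     def first(stream, select):
--         return next((c for c in map(select, stream) if c is not None), "")
--
--     sh = first(chain(ah, ab),
--                lambda it: (lambda a: a if a.startswith("6") else None)(norm(it, "aCode")))
--     sz = first(chain(ah, ab),
--                lambda it: (lambda a: a if a and not a.startswith("6") else None)(norm(it, "aCode")))
--     hk = first(ah,
--                lambda it: (lambda h: h if h else None)(norm(it, "hCode")))
--     shb = first(ab,
--                 lambda it: (lambda b: b if norm(it, "bMarket").lower() == "sh" and b else None)(norm(it, "bCode")))
--     szb = first(ab,
--                 lambda it: (lambda b: b if norm(it, "bMarket").lower() == "sz" and b else None)(norm(it, "bCode")))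
--
--     return {
--         "sh": sh or "600000",
--         "sz": sz or "000001",
--         "hk": hk or "00005",
--         "us": "",
--         "shb": shb or "900901",
--         "szb": szb or "200002",
--     }
-- ===== Notes on version B (the rewrite author's own statement) =====
-- stated objective: simpler
-- what changed: A threads one mutable samples dict through two interleaved flag-checking loops plus a fallback loop; B computes each market independently as a first-match search (next over a generator) over ah++ab, ah, or ab, and assembles the result dict in one literal with `or`-fallbacks.
import Mathlib
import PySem

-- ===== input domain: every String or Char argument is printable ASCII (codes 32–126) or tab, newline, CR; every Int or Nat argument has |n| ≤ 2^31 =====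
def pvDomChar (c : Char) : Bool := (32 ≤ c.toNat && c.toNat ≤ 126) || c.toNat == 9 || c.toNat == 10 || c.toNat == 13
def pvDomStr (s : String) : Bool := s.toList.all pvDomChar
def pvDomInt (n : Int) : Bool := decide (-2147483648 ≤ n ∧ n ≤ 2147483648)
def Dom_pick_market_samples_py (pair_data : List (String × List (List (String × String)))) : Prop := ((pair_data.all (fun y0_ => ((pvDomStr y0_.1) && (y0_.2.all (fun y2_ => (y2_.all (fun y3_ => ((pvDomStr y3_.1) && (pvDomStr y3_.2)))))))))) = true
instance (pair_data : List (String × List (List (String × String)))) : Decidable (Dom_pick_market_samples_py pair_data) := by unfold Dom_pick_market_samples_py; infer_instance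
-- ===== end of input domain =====

-- B replaces A's flag-maintaining interleaved loops by one independent first-match search per
-- market (objective: simpler decomposition, same cost).

-- shared normalization helper: str(item.get(key) or "").strip() — values are strings, so str() is
-- the identity and `or ""` only replaces a missing/empty value by "" (exact on assoc-list dicts)
def pvNorm (item : List (String × String)) (key : String) : String :=
  PySem.Str.strip ((item.lookup key).getD "")

-- ===== PORT A =====
-- body of A's `for item in pair_data.get("ah", [])` loop (samples always has all six keys, so
-- Python's samples[k] is exactly getD k "")
def stepA1 (s : PySem.Dict String String) (item : List (String × String)) : PySem.Dict String String :=
  let a := pvNorm item "aCode"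
  let h := pvNorm item "hCode"
  let s := if PySem.Str.startswith a "6" && (s.getD "sh" "" == "") then s.insert "sh" a else s
  let s := if (!(a == "") && !PySem.Str.startswith a "6") && (s.getD "sz" "" == "") then s.insert "sz" a else s
  let s := if (!(h == "")) && (s.getD "hk" "" == "") then s.insert "hk" h else s
  s

-- body of A's `for item in pair_data.get("ab", [])` loop
def stepA2 (s : PySem.Dict String String) (item : List (String × String)) : PySem.Dict String String :=
  let a := pvNorm item "aCode"
  let b := pvNorm item "bCode"
  let bm := PySem.Str.lower (pvNorm item "bMarket")
  let s := if PySem.Str.startswith a "6" && (s.getD "sh" "" == "") then s.insert "sh" a else s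
  let s := if (!(a == "") && !PySem.Str.startswith a "6") && (s.getD "sz" "" == "") then s.insert "sz" a else s
  let s := if ((bm == "sh") && !(b == "")) && (s.getD "shb" "" == "") then s.insert "shb" b else s
  let s := if ((bm == "sz") && !(b == "")) && (s.getD "szb" "" == "") then s.insert "szb" b else s
  s

-- body of A's `for market, fallback in fallbacks.items()` loop
def stepFb (s : PySem.Dict String String) (p : String × String) : PySem.Dict String String :=
  if s.getD p.1 "" == "" then s.insert p.1 p.2 else s

def pick_market_samples_py (pair_data : List (String × List (List (String × String)))) : List (String × String) :=
  let samples : PySem.Dict String String :=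
    PySem.Dict.ofList [("sh", ""), ("sz", ""), ("hk", ""), ("us", ""), ("shb", ""), ("szb", "")]
  let samples := ((pair_data.lookup "ah").getD []).foldl stepA1 samples
  let samples := ((pair_data.lookup "ab").getD []).foldl stepA2 samples
  let fallbacks : PySem.Dict String String :=
    PySem.Dict.ofList [("sh", "600000"), ("sz", "000001"), ("hk", "00005"), ("shb", "900901"), ("szb", "200002")]
  let samples := fallbacks.items.foldl stepFb samples
  samples.items

-- ===== PORT B =====
-- next((c for c in map(select, stream) if c is not None), "")
def pvSel (stream : List (List (String × String)))
    (select : List (String × String) → Option String) : String :=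
  (stream.findSome? select).getD ""

-- Python's `s or fb` on strings
def pvOr (s fb : String) : String := if s == "" then fb else s

-- the five selectors of Source B
def pvSel6 (it : List (String × String)) : Option String :=
  let a := pvNorm it "aCode"
  if PySem.Str.startswith a "6" then some a else none

def pvSelN6 (it : List (String × String)) : Option String :=
  let a := pvNorm it "aCode"
  if !(a == "") && !PySem.Str.startswith a "6" then some a else none

def pvSelHk (it : List (String × String)) : Option String :=
  let h := pvNorm it "hCode"
  if !(h == "") then some h else none

def pvSelShb (it : List (String × String)) : Option String :=
  let b := pvNorm it "bCode"
  if (PySem.Str.lower (pvNorm it "bMarket") == "sh") && !(b == "") then some b else none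

def pvSelSzb (it : List (String × String)) : Option String :=
  let b := pvNorm it "bCode"
  if (PySem.Str.lower (pvNorm it "bMarket") == "sz") && !(b == "") then some b else none

def pick_market_samples_py_alt (pair_data : List (String × List (List (String × String)))) : List (String × String) :=
  let ah := (pair_data.lookup "ah").getD []
  let ab := (pair_data.lookup "ab").getD []
  let sh := pvSel (ah ++ ab) pvSel6
  let sz := pvSel (ah ++ ab) pvSelN6
  let hk := pvSel ah pvSelHk
  let shb := pvSel ab pvSelShb
  let szb := pvSel ab pvSelSzb
  [("sh", pvOr sh "600000"), ("sz", pvOr sz "000001"), ("hk", pvOr hk "00005"),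
   ("us", ""), ("shb", pvOr shb "900901"), ("szb", pvOr szb "200002")]

-- ===== PRECONDITION & SPEC =====
def Spec_pick_market_samples_py (pair_data : List (String × List (List (String × String)))) (out : List (String × String)) : Prop := out = pick_market_samples_py_alt pair_data
instance (pair_data : List (String × List (List (String × String)))) (out : List (String × String)) : Decidable (Spec_pick_market_samples_py pair_data out) := by unfold Spec_pick_market_samples_py; infer_instance

-- ===== CLAIM (what is proved, stated in full; the proofs are below) =====
def Claim_equal_pick_market_samples_py : Prop := ∀ (pair_data : List (String × List (List (String × String)))), Dom_pick_market_samples_py pair_data → Spec_pick_market_samples_py pair_data (pick_market_samples_py pair_data)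

-- ===== LEMMAS AND PROOFS =====

def mk6 (sh sz hk us shb szb : String) : PySem.Dict String String :=
  PySem.Dict.mk [("sh", sh), ("sz", sz), ("hk", hk), ("us", us), ("shb", shb), ("szb", szb)]

theorem getD_mk6_sh (a b c d e f : String) : (mk6 a b c d e f).getD "sh" "" = a := rfl
theorem getD_mk6_sz (a b c d e f : String) : (mk6 a b c d e f).getD "sz" "" = b := rfl
theorem getD_mk6_hk (a b c d e f : String) : (mk6 a b c d e f).getD "hk" "" = c := rfl
theorem getD_mk6_shb (a b c d e f : String) : (mk6 a b c d e f).getD "shb" "" = e := rfl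
theorem getD_mk6_szb (a b c d e f : String) : (mk6 a b c d e f).getD "szb" "" = f := rfl
theorem ins_mk6_sh (a b c d e f v : String) : (mk6 a b c d e f).insert "sh" v = mk6 v b c d e f := rfl
theorem ins_mk6_sz (a b c d e f v : String) : (mk6 a b c d e f).insert "sz" v = mk6 a v c d e f := rfl
theorem ins_mk6_hk (a b c d e f v : String) : (mk6 a b c d e f).insert "hk" v = mk6 a b v d e f := rfl
theorem ins_mk6_shb (a b c d e f v : String) : (mk6 a b c d e f).insert "shb" v = mk6 a b c d v f := rfl
theorem ins_mk6_szb (a b c d e f v : String) : (mk6 a b c d e f).insert "szb" v = mk6 a b c d e v := rfl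

theorem iteB_false {α : Sort _} (x y : α) : (if (false = true) then x else y) = y := by simp

theorem stepA1_mk6 (it : List (String × String)) (a b c d e f : String) :
    stepA1 (mk6 a b c d e f) it =
    mk6 (if PySem.Str.startswith (pvNorm it "aCode") "6" && (a == "") then pvNorm it "aCode" else a)
        (if (!(pvNorm it "aCode" == "") && !PySem.Str.startswith (pvNorm it "aCode") "6") && (b == "") then pvNorm it "aCode" else b)
        (if (!(pvNorm it "hCode" == "")) && (c == "") then pvNorm it "hCode" else c)
        d e f := by
  simp only [stepA1, getD_mk6_sh]
  rcases Bool.eq_false_or_eq_true (PySem.Str.startswith (pvNorm it "aCode") "6" && (a == "")) with h1|h1 <;>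
    simp only [h1, iteB_false, if_true, ins_mk6_sh, getD_mk6_sz] <;>
  (rcases Bool.eq_false_or_eq_true ((!(pvNorm it "aCode" == "") && !PySem.Str.startswith (pvNorm it "aCode") "6") && (b == "")) with h2|h2 <;>
    simp only [h2, iteB_false, if_true, ins_mk6_sz, getD_mk6_hk]) <;>
  (rcases Bool.eq_false_or_eq_true ((!(pvNorm it "hCode" == "")) && (c == "")) with h3|h3 <;>
    simp only [h3, iteB_false, if_true, ins_mk6_hk])

theorem stepA2_mk6 (it : List (String × String)) (a b c d e f : String) :
    stepA2 (mk6 a b c d e f) it =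
    mk6 (if PySem.Str.startswith (pvNorm it "aCode") "6" && (a == "") then pvNorm it "aCode" else a)
        (if (!(pvNorm it "aCode" == "") && !PySem.Str.startswith (pvNorm it "aCode") "6") && (b == "") then pvNorm it "aCode" else b)
        c d
        (if ((PySem.Str.lower (pvNorm it "bMarket") == "sh") && !(pvNorm it "bCode" == "")) && (e == "") then pvNorm it "bCode" else e)
        (if ((PySem.Str.lower (pvNorm it "bMarket") == "sz") && !(pvNorm it "bCode" == "")) && (f == "") then pvNorm it "bCode" else f) := by
  simp only [stepA2, getD_mk6_sh]
  rcases Bool.eq_false_or_eq_true (PySem.Str.startswith (pvNorm it "aCode") "6" && (a == "")) with h1|h1 <;>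
    simp only [h1, iteB_false, if_true, ins_mk6_sh, getD_mk6_sz] <;>
  (rcases Bool.eq_false_or_eq_true ((!(pvNorm it "aCode" == "") && !PySem.Str.startswith (pvNorm it "aCode") "6") && (b == "")) with h2|h2 <;>
    simp only [h2, iteB_false, if_true, ins_mk6_sz, getD_mk6_shb]) <;>
  (rcases Bool.eq_false_or_eq_true (((PySem.Str.lower (pvNorm it "bMarket") == "sh") && !(pvNorm it "bCode" == "")) && (e == "")) with h3|h3 <;>
    simp only [h3, iteB_false, if_true, ins_mk6_shb, getD_mk6_szb]) <;>
  (rcases Bool.eq_false_or_eq_true (((PySem.Str.lower (pvNorm it "bMarket") == "sz") && !(pvNorm it "bCode" == "")) && (f == "")) with h4|h4 <;>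
    simp only [h4, iteB_false, if_true, ins_mk6_szb])

theorem pvOr_empty_left (x : String) : pvOr "" x = x := by simp [pvOr]
theorem pvOr_empty_right (s : String) : pvOr s "" = s := by
  by_cases h : s = "" <;> simp [pvOr, h]
theorem pvOr_of_ne {c : String} (h : c ≠ "") (x : String) : pvOr c x = c := by simp [pvOr, h]

theorem pvSel_nil (f : List (String × String) → Option String) : pvSel [] f = "" := rfl
theorem pvSel_cons (it : List (String × String)) (rest : List (List (String × String)))
    (f : List (String × String) → Option String) :
    pvSel (it :: rest) f = (f it).getD (pvSel rest f) := by
  cases h : f it <;> simp [pvSel, h]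

theorem optIf_getD {α : Type} (q : Bool) (v x : α) :
    (if q then some v else none).getD x = if q then v else x := by
  cases q <;> simp

theorem orS_step (q : Bool) (s val x : String) (hval : q = true → val ≠ "") :
    pvOr (if q && (s == "") then val else s) x = pvOr s (if q then val else x) := by
  cases q with
  | false => simp
  | true =>
    by_cases hs : s = ""
    · subst hs; simp [pvOr, hval rfl]
    · simp [pvOr, hs]

theorem startswith6_ne {s : String} (h : PySem.Str.startswith s "6" = true) : s ≠ "" := by
  intro he; subst he; revert h; decide

theorem notEmpty_ne {s : String} (h : (!(s == "")) = true) : s ≠ "" := by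
  intro he; subst he; simp at h

theorem andNeLeft_ne {s : String} {t : Bool} (h : (!(s == "") && t) = true) : s ≠ "" := by
  intro he; subst he; simp at h

theorem andNeRight_ne {s : String} {t : Bool} (h : (t && !(s == "")) = true) : s ≠ "" := by
  intro he; subst he; simp at h

theorem loop1_mk6 (l : List (List (String × String))) (a b c d e f : String) :
    l.foldl stepA1 (mk6 a b c d e f) =
    mk6 (pvOr a (pvSel l pvSel6)) (pvOr b (pvSel l pvSelN6)) (pvOr c (pvSel l pvSelHk)) d e f := by
  induction l generalizing a b c with
  | nil => simp only [List.foldl_nil, pvSel_nil, pvOr_empty_right]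
  | cons it rest ih =>
    rw [List.foldl_cons, stepA1_mk6, ih, pvSel_cons, pvSel_cons, pvSel_cons]
    simp only [pvSel6, pvSelN6, pvSelHk, optIf_getD]
    rw [orS_step _ _ _ _ (fun hq => startswith6_ne hq),
        orS_step _ _ _ _ (fun hq => andNeLeft_ne hq),
        orS_step _ _ _ _ (fun hq => notEmpty_ne hq)]

theorem loop2_mk6 (l : List (List (String × String))) (a b c d e f : String) :
    l.foldl stepA2 (mk6 a b c d e f) =
    mk6 (pvOr a (pvSel l pvSel6)) (pvOr b (pvSel l pvSelN6)) c d
        (pvOr e (pvSel l pvSelShb)) (pvOr f (pvSel l pvSelSzb)) := by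
  induction l generalizing a b e f with
  | nil => simp only [List.foldl_nil, pvSel_nil, pvOr_empty_right]
  | cons it rest ih =>
    rw [List.foldl_cons, stepA2_mk6, ih, pvSel_cons, pvSel_cons, pvSel_cons, pvSel_cons]
    simp only [pvSel6, pvSelN6, pvSelShb, pvSelSzb, optIf_getD]
    rw [orS_step _ _ _ _ (fun hq => startswith6_ne hq),
        orS_step _ _ _ _ (fun hq => andNeLeft_ne hq),
        orS_step _ _ _ _ (fun hq => andNeRight_ne hq),
        orS_step _ _ _ _ (fun hq => andNeRight_ne hq)]

theorem pvSel_append (l1 l2 : List (List (String × String)))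
    (f : List (String × String) → Option String)
    (hne : ∀ it c, f it = some c → c ≠ "") :
    pvSel (l1 ++ l2) f = pvOr (pvSel l1 f) (pvSel l2 f) := by
  simp only [pvSel, List.findSome?_append]
  cases h : l1.findSome? f with
  | none => simp [pvOr_empty_left]
  | some c =>
    obtain ⟨it, _, hit⟩ := List.exists_of_findSome?_eq_some h
    simp [pvOr_of_ne (hne _ _ hit)]

theorem pvSel6_ne (it : List (String × String)) (c : String) (h : pvSel6 it = some c) : c ≠ "" := by
  simp only [pvSel6] at h
  split at h
  · cases h; exact startswith6_ne (by assumption)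
  · cases h

theorem pvSelN6_ne (it : List (String × String)) (c : String) (h : pvSelN6 it = some c) : c ≠ "" := by
  simp only [pvSelN6] at h
  split at h
  · cases h; exact andNeLeft_ne (by assumption)
  · cases h

theorem stepFb_sh (a b c d e f v : String) :
    stepFb (mk6 a b c d e f) ("sh", v) = mk6 (pvOr a v) b c d e f := by
  rcases Bool.eq_false_or_eq_true (a == "") with h|h <;>
    simp_all [stepFb, pvOr, getD_mk6_sh, ins_mk6_sh]

theorem stepFb_sz (a b c d e f v : String) :
    stepFb (mk6 a b c d e f) ("sz", v) = mk6 a (pvOr b v) c d e f := by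
  rcases Bool.eq_false_or_eq_true (b == "") with h|h <;>
    simp_all [stepFb, pvOr, getD_mk6_sz, ins_mk6_sz]

theorem stepFb_hk (a b c d e f v : String) :
    stepFb (mk6 a b c d e f) ("hk", v) = mk6 a b (pvOr c v) d e f := by
  rcases Bool.eq_false_or_eq_true (c == "") with h|h <;>
    simp_all [stepFb, pvOr, getD_mk6_hk, ins_mk6_hk]

theorem stepFb_shb (a b c d e f v : String) :
    stepFb (mk6 a b c d e f) ("shb", v) = mk6 a b c d (pvOr e v) f := by
  rcases Bool.eq_false_or_eq_true (e == "") with h|h <;>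
    simp_all [stepFb, pvOr, getD_mk6_shb, ins_mk6_shb]

theorem stepFb_szb (a b c d e f v : String) :
    stepFb (mk6 a b c d e f) ("szb", v) = mk6 a b c d e (pvOr f v) := by
  rcases Bool.eq_false_or_eq_true (f == "") with h|h <;>
    simp_all [stepFb, pvOr, getD_mk6_szb, ins_mk6_szb]

theorem samples0_eq :
    PySem.Dict.ofList [("sh", ""), ("sz", ""), ("hk", ""), ("us", ""), ("shb", ""), ("szb", "")]
      = mk6 "" "" "" "" "" "" := rfl

theorem fbItems_eq :
    (PySem.Dict.ofList [("sh", "600000"), ("sz", "000001"), ("hk", "00005"), ("shb", "900901"), ("szb", "200002")] :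
      PySem.Dict String String).items
      = [("sh", "600000"), ("sz", "000001"), ("hk", "00005"), ("shb", "900901"), ("szb", "200002")] := rfl

theorem items_mk6 (a b c d e f : String) :
    (mk6 a b c d e f).items = [("sh", a), ("sz", b), ("hk", c), ("us", d), ("shb", e), ("szb", f)] := rfl

-- ===== VERDICT (by name: the statement is the Claim_ definition above) =====
theorem pick_market_samples_py_spec : Claim_equal_pick_market_samples_py := by
  intro pd _
  simp only [Spec_pick_market_samples_py, pick_market_samples_py, pick_market_samples_py_alt]
  rw [samples0_eq, loop1_mk6, loop2_mk6, fbItems_eq]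
  simp only [List.foldl_cons, List.foldl_nil]
  rw [stepFb_sh, stepFb_sz, stepFb_hk, stepFb_shb, stepFb_szb, items_mk6]
  rw [pvSel_append _ _ _ pvSel6_ne, pvSel_append _ _ _ pvSelN6_ne]
  simp only [pvOr_empty_left]
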